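-- pv_equiv track=rewrite | github.com/cbahcevan/turkishsd | turkishsd/deasciifier.py | generateCandidates
-- ===== SOURCE A (Python) =====
-- turkish_entry_possible_deascii_map = {
--         "i":"ı",
--         "u":"ü",
--         "g":"ğ",
--         "o":"ö",
--         "c":"ç",
--         "s":"ş",
--         "ı":"i"
--     }
--
-- def generateCandidates(word,start_index):
--         if len(word) == start_index :
--             return []
--         elif word[start_index] in turkish_entry_possible_deascii_map:
--
--             word_manipulated = list(word)
--             word_manipulated[start_index] = turkish_entry_possible_deascii_map[word[start_index]]
--             word_manipulated = "".join(word_manipulated)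
--
--             return [word,word_manipulated] + generateCandidates(word,start_index + 1) + generateCandidates(word_manipulated,start_index + 1)
--
--         return generateCandidates(word,start_index+1)
-- ===== SOURCE B (Python) =====
-- turkish_entry_possible_deascii_map = {
--         "i":"ı",
--         "u":"ü",
--         "g":"ğ",
--         "o":"ö",
--         "c":"ç",
--         "s":"ş",
--         "ı":"i"
--     }
--
-- def generateCandidates(word, start_index):
--     m = turkish_entry_possible_deascii_map
--     idxs = [i for i in range(start_index, len(word)) if word[i] in m]
--     n = len(idxs)
--     result = []
--     stack = [(word, 0)]
--     while stack:
--         s, j = stack.pop()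
--         if j == n:
--             continue
--         i = idxs[j]
--         s_manip = s[:i] + m[s[i]] + s[i+1:]
--         result.append(s)
--         result.append(s_manip)
--         stack.append((s_manip, j + 1))
--         stack.append((s, j + 1))
--     return result
-- ===== Notes on version B (the rewrite author's own statement) =====
-- stated objective: alternative
-- what changed: Replaces A's branching recursion that rescans the word position by position with a single upfront scan collecting the mappable indices followed by an explicit-stack iterative preorder enumeration over that index list. Pre_ excludes negative start_index, where A's value arises from Python's negative-index wraparound (B raises or differs there), and start_index > len(word), where A raises IndexError.
-- outside the precondition, e.g. on generateCandidates('u', -1): A returns ['u', 'ü', 'u', 'ü'], B raises KeyError; on generateCandidates('i', -1): A returns ['i', 'ı', 'i', 'ı', 'ı', 'i'], B returns ['i', 'ıi', 'i', 'ı', 'ıi', 'ii']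
import Mathlib
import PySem

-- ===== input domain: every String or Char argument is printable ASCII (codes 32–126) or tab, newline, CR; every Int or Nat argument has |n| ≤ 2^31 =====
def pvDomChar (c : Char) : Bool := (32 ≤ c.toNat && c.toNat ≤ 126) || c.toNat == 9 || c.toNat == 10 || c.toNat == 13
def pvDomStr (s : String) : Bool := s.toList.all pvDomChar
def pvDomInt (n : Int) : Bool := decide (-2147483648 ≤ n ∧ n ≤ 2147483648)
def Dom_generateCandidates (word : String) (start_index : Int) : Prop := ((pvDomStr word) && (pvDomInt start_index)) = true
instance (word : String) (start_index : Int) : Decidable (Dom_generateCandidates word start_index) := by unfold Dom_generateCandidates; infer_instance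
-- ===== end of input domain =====

-- B replaces A's branching recursion by one upfront scan for the mappable indices plus an
-- explicit-stack preorder enumeration over that index list (objective: alternative, same cost).

-- ===== PORT A =====

-- the module-level dict turkish_entry_possible_deascii_map, as a lookup on single chars
def deasciiMap? (c : Char) : Option Char :=
  if c = 'i' then some 'ı'
  else if c = 'u' then some 'ü'
  else if c = 'g' then some 'ğ'
  else if c = 'o' then some 'ö'
  else if c = 'c' then some 'ç'
  else if c = 's' then some 'ş'
  else if c = 'ı' then some 'i'
  else none

-- A's recursion, step for step; fuel only makes the recursion total (within Pre_ the
-- depth is at most word.length - start_index, so fuel word.length + 1 is never exhausted)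
def genA : Nat → List Char → Int → List String
  | 0, _, _ => []
  | fuel + 1, w, s =>
    if (w.length : Int) = s then []
    else
      match PySem.List.pyGet? w s with
      | none => []   -- Python IndexError here (outside Pre_)
      | some c =>
        match deasciiMap? c with
        | some r =>
          let wm := PySem.List.pySetD w s r
          [String.ofList w, String.ofList wm] ++ genA fuel w (s + 1) ++ genA fuel wm (s + 1)
        | none => genA fuel w (s + 1)

def generateCandidates (word : String) (start_index : Int) : List String :=
  genA (word.toList.length + 1 + start_index.natAbs) word.toList start_index

-- ===== PORT B =====

-- idxs = [i for i in range(start_index, len(word)) if word[i] in m]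
def bIdxs (w : List Char) (s : Int) : List Int :=
  (PySem.List.pyRange s (w.length : Int) 1).filter (fun i =>
    match PySem.List.pyGet? w i with
    | some c => (deasciiMap? c).isSome
    | none => false)

-- the while-stack loop; fuel only makes the loop total (each pop consumes one unit and
-- within Pre_ the number of pops is below 2^(len(idxs)+1))
def genB (idxs : List Int) (fuel : Nat) (stack : List (List Char × Nat)) (res : List String) : List String :=
  match stack with
  | [] => res
  | (s, j) :: rest =>
    match fuel with
    | 0 => res
    | fuel + 1 =>
      if j = idxs.length then genB idxs fuel rest res
      else
        match PySem.List.pyGet? idxs (j : Int) with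
        | none => res
        | some i =>
          match PySem.List.pyGet? s i with
          | none => res   -- IndexError (outside Pre_)
          | some c =>
            match deasciiMap? c with
            | none => res  -- Python KeyError here (outside Pre_)
            | some r =>
              let smanip := PySem.List.slice s none (some i) ++ [r] ++ PySem.List.slice s (some (i + 1)) none
              genB idxs fuel ((s, j + 1) :: (smanip, j + 1) :: rest) (res ++ [String.ofList s, String.ofList smanip])

def generateCandidates_alt (word : String) (start_index : Int) : List String :=
  let idxs := bIdxs word.toList start_index
  genB idxs (2 ^ (idxs.length + 1)) [(word.toList, 0)] []

-- ===== PRECONDITION & SPEC =====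
-- Pre_ excludes negative start_index, on which A's value arises from Python's negative-index
-- wraparound rescanning aliased positions (B raises KeyError or differs there), and
-- start_index > len(word), on which A raises IndexError.
def Pre_generateCandidates (word : String) (start_index : Int) : Prop :=
  0 ≤ start_index ∧ start_index ≤ (word.toList.length : Int)
instance (word : String) (start_index : Int) : Decidable (Pre_generateCandidates word start_index) := by
  unfold Pre_generateCandidates; infer_instance

def pvWitness_generateCandidates : String × Int := ("cis", 0)

def Spec_generateCandidates (word : String) (start_index : Int) (out : List String) : Prop := out = generateCandidates_alt word start_index
instance (word : String) (start_index : Int) (out : List String) : Decidable (Spec_generateCandidates word start_index out) := by unfold Spec_generateCandidates; infer_instance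

-- ===== CLAIM (what is proved, stated in full; the proofs are below) =====
def Claim_equal_generateCandidates : Prop := ∀ (word : String) (start_index : Int), Dom_generateCandidates word start_index → Pre_generateCandidates word start_index → Spec_generateCandidates word start_index (generateCandidates word start_index)

-- ===== LEMMAS AND PROOFS =====

-- positions ≥ k of w holding a mappable char, in increasing order (common characterisation)
def natIdxs (w : List Char) (k : Nat) : List Nat :=
  if h : k < w.length then
    if (deasciiMap? w[k]).isSome then k :: natIdxs w (k + 1) else natIdxs w (k + 1)
  else []
termination_by w.length - k

-- the manipulated word at position i
theorem natIdxs_unfold (w : List Char) (k : Nat) : natIdxs w k =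
    if h : k < w.length then
      (if (deasciiMap? w[k]).isSome then k :: natIdxs w (k + 1) else natIdxs w (k + 1))
    else [] := by
  rw [natIdxs]

def applyM (w : List Char) (i : Nat) : List Char :=
  w.set i ((deasciiMap? (w.getD i ' ')).getD ' ')

def castList (L : List Nat) : List Int := L.map Nat.cast

-- the common denotation: preorder enumeration of variants over an index list
def FF : List Nat → List Char → List String
  | [], _ => []
  | i :: is, w =>
    String.ofList w :: String.ofList (applyM w i) :: (FF is w ++ FF is (applyM w i))

theorem natIdxs_congr (w w' : List Char) (hlen : w.length = w'.length) :
    ∀ (d k : Nat), w.length - k ≤ d →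
      (∀ j, k ≤ j → (hj : j < w.length) → w[j] = w'[j]'(hlen ▸ hj)) →
      natIdxs w k = natIdxs w' k
  | 0, k, hd, hag => by
    rw [natIdxs_unfold w k, natIdxs_unfold w' k, dif_neg (by omega), dif_neg (by omega)]
  | d + 1, k, hd, hag => by
    rw [natIdxs_unfold w k, natIdxs_unfold w' k]
    by_cases h : k < w.length
    · have h' : k < w'.length := hlen ▸ h
      rw [dif_pos h, dif_pos h']
      have hk : w[k] = w'[k] := hag k le_rfl h
      have ih : natIdxs w (k + 1) = natIdxs w' (k + 1) :=
        natIdxs_congr w w' hlen d (k + 1) (by omega) (fun j hj hjl => hag j (by omega) hjl)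
      rw [← hk, ih]
    · rw [dif_neg h, dif_neg (by omega)]

theorem natIdxs_mem (w : List Char) :
    ∀ (d k : Nat), w.length - k ≤ d →
      ∀ j ∈ natIdxs w k, k ≤ j ∧ j < w.length ∧ (deasciiMap? (w.getD j ' ')).isSome
  | 0, k, hd => by
    rw [natIdxs_unfold w k, dif_neg (by omega)]; intro j hj; exact absurd hj (List.not_mem_nil)
  | d + 1, k, hd => by
    rw [natIdxs_unfold w k]
    by_cases h : k < w.length
    · rw [dif_pos h]
      have ih := natIdxs_mem w d (k + 1) (by omega)
      split_ifs with hm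
      · intro j hj
        rcases List.mem_cons.mp hj with rfl | hj
        · exact ⟨le_rfl, h, by rwa [List.getD_eq_getElem _ _ h]⟩
        · have := ih j hj; exact ⟨by omega, this.2.1, this.2.2⟩
      · intro j hj; have := ih j hj; exact ⟨by omega, this.2.1, this.2.2⟩
    · rw [dif_neg h]; intro j hj; exact absurd hj (List.not_mem_nil)

theorem natIdxs_pairwise (w : List Char) :
    ∀ (d k : Nat), w.length - k ≤ d → (natIdxs w k).Pairwise (· < ·)
  | 0, k, hd => by rw [natIdxs_unfold w k, dif_neg (by omega)]; exact List.Pairwise.nil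
  | d + 1, k, hd => by
    rw [natIdxs_unfold w k]
    by_cases h : k < w.length
    · rw [dif_pos h]
      have ih := natIdxs_pairwise w d (k + 1) (by omega)
      split_ifs with hm
      · exact List.Pairwise.cons
          (fun j hj => by have := natIdxs_mem w (w.length - (k + 1)) (k + 1) le_rfl j hj; omega) ih
      · exact ih
    · rw [dif_neg h]; exact List.Pairwise.nil

theorem lemA : ∀ (fuel : Nat) (w : List Char) (k : Nat), w.length - k < fuel → k ≤ w.length →
    genA fuel w (k : Int) = FF (natIdxs w k) w
  | 0, w, k, hf, hk => absurd hf (Nat.not_lt_zero _)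
  | fuel + 1, w, k, hf, hk => by
    rw [genA]
    by_cases he : w.length = k
    · rw [if_pos (by exact_mod_cast he), natIdxs_unfold w k, dif_neg (by omega)]; rfl
    · have hklt : k < w.length := by omega
      rw [if_neg (by exact_mod_cast he)]
      have hg : PySem.List.pyGet? w (k : Int) = some w[k] := by
        rw [PySem.List.pyGet?_natCast, List.getElem?_eq_getElem hklt]
      rw [hg]
      have hcast : (k : Int) + 1 = ((k + 1 : Nat) : Int) := by push_cast; ring
      rw [natIdxs_unfold w k, dif_pos hklt]
      cases hm : deasciiMap? w[k] with
      | none =>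
        simp only [hm, Option.isSome_none, Bool.false_eq_true, if_false, hcast]
        exact lemA fuel w (k + 1) (by omega) (by omega)
      | some r =>
        simp only [hm, Option.isSome_some, if_true]
        have hwm : PySem.List.pySetD w (k : Int) r = w.set k r := by
          simp [PySem.List.pySetD_natCast]
        have happ : applyM w k = w.set k r := by
          simp [applyM, List.getElem?_eq_getElem hklt, hm]
        have hA1 : genA fuel w ((k : Int) + 1) = FF (natIdxs w (k + 1)) w := by
          rw [hcast]; exact lemA fuel w (k + 1) (by omega) (by omega)
        have hA2 : genA fuel (w.set k r) ((k : Int) + 1) = FF (natIdxs w (k + 1)) (w.set k r) := by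
          rw [hcast]
          have hcg : natIdxs (w.set k r) (k + 1) = natIdxs w (k + 1) :=
            natIdxs_congr (w.set k r) w (by simp) (w.length - (k + 1)) (k + 1)
              (by simp) (fun j hj hjl => List.getElem_set_ne (by omega) hjl)
          rw [← hcg]
          exact lemA fuel (w.set k r) (k + 1) (by simp; omega) (by simp; omega)
        rw [hwm, hA1, hA2, FF, happ]
        simp

theorem lemIdx (w : List Char) :
    ∀ (d k : Nat), w.length - k ≤ d →
      bIdxs w (k : Int) = castList (natIdxs w k)
  | 0, k, hd => by
    rw [bIdxs, natIdxs_unfold w k, dif_neg (by omega),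
      PySem.List.pyRange_one_eq_nil (by exact_mod_cast by omega)]
    rfl
  | d + 1, k, hd => by
    rw [bIdxs, natIdxs_unfold w k]
    by_cases h : k < w.length
    · rw [dif_pos h, PySem.List.pyRange_one_cons (by exact_mod_cast h), List.filter_cons]
      have hg : PySem.List.pyGet? w (k : Int) = some w[k] := by
        rw [PySem.List.pyGet?_natCast, List.getElem?_eq_getElem h]
      have hcast : (k : Int) + 1 = ((k + 1 : Nat) : Int) := by push_cast; ring
      have htail : (PySem.List.pyRange ((k : Int) + 1) (w.length : Int) 1).filter (fun i =>
          match PySem.List.pyGet? w i with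
          | some c => (deasciiMap? c).isSome
          | none => false) = bIdxs w ((k + 1 : Nat) : Int) := by
        rw [bIdxs, hcast]
      have ih := lemIdx w d (k + 1) (by omega)
      cases hm : deasciiMap? w[k] with
      | none => simp only [hg, hm, Option.isSome_none, Bool.false_eq_true, if_false, htail, ih]
      | some r =>
        simp only [hg, hm, Option.isSome_some, if_true, htail, ih, castList, List.map_cons]
    · rw [dif_neg h, PySem.List.pyRange_one_eq_nil (by exact_mod_cast by omega)]
      rfl

theorem lemB (L : List Nat) (hL : L.Pairwise (· < ·)) :
    ∀ (fuel : Nat) (frames : List (List Char × Nat)) (res : List String),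
      (∀ p ∈ frames, p.2 ≤ L.length ∧
        ∀ idx ∈ L.drop p.2, idx < p.1.length ∧ (deasciiMap? (p.1.getD idx ' ')).isSome) →
      (frames.map (fun p => 2 ^ (L.length - p.2 + 1) - 1)).sum ≤ fuel →
      genB (castList L) fuel frames res
        = res ++ (frames.map (fun p => FF (L.drop p.2) p.1)).flatten
  | fuel, [], res, _, _ => by rw [genB]; simp
  | 0, (s, j) :: rest, res, hinv, hpot => by
    exfalso
    have h1 : 1 ≤ 2 ^ (L.length - j + 1) - 1 := by
      have := Nat.one_lt_two_pow (n := L.length - j + 1) (by omega); omega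
    simp only [List.map_cons, List.sum_cons] at hpot
    omega
  | fuel + 1, (s, j) :: rest, res, hinv, hpot => by
    obtain ⟨hj, hidx⟩ := hinv (s, j) (List.mem_cons_self)
    have hinvrest : ∀ p ∈ rest, p.2 ≤ L.length ∧
        ∀ idx ∈ L.drop p.2, idx < p.1.length ∧ (deasciiMap? (p.1.getD idx ' ')).isSome :=
      fun p hp => hinv p (List.mem_cons_of_mem _ hp)
    simp only [List.map_cons, List.sum_cons] at hpot
    rw [genB, show (castList L).length = L.length from by simp [castList]]
    by_cases hje : j = L.length
    · rw [if_pos hje]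
      have ih := lemB L hL fuel rest res hinvrest (by
        have : L.length - j = 0 := by omega
        simp only [this] at hpot; omega)
      rw [ih]
      subst hje
      simp [List.drop_length, FF]
    · rw [if_neg hje]
      have hjlt : j < L.length := by omega
      have hdropj : L.drop j = L[j] :: L.drop (j + 1) := (List.getElem_cons_drop hjlt).symm
      have hgi : PySem.List.pyGet? (castList L) (j : Int) = some ((L[j] : Int)) := by
        rw [castList, PySem.List.pyGet?_natCast, List.getElem?_map, List.getElem?_eq_getElem hjlt]
        rfl
      have hmemj : L[j] ∈ L.drop j := by rw [hdropj]; exact List.mem_cons_self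
      obtain ⟨hilen, hisome⟩ := hidx L[j] hmemj
      have hgs : PySem.List.pyGet? s ((L[j] : Nat) : Int) = some s[L[j]] := by
        rw [PySem.List.pyGet?_natCast, List.getElem?_eq_getElem hilen]
      have hgd : s.getD L[j] ' ' = s[L[j]] := List.getD_eq_getElem _ _ hilen
      rw [hgd] at hisome
      obtain ⟨r, hr⟩ := Option.isSome_iff_exists.mp hisome
      simp only [hgi, hgs, hr]
      have hsl1 : PySem.List.slice s none (some ((L[j] : Nat) : Int)) = s.take L[j] :=
        PySem.List.slice_to_natCast s L[j]
      have hcast : ((L[j] : Nat) : Int) + 1 = ((L[j] + 1 : Nat) : Int) := by push_cast; ring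
      have hsl2 : PySem.List.slice s (some (((L[j] : Nat) : Int) + 1)) none = s.drop (L[j] + 1) := by
        rw [hcast]; exact PySem.List.slice_from_natCast s (L[j] + 1)
      have hset : s.take L[j] ++ [r] ++ s.drop (L[j] + 1) = s.set L[j] r := by
        rw [List.set_eq_take_append_cons_drop, if_pos hilen]; simp
      have happ : applyM s L[j] = s.set L[j] r := by
        simp [applyM, List.getElem?_eq_getElem hilen, hr]
      have hpairj : ∀ idx ∈ L.drop (j + 1), L[j] < idx := by
        have hpd : (L.drop j).Pairwise (· < ·) := hL.sublist (List.drop_sublist j L)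
        rw [hdropj] at hpd
        exact (List.pairwise_cons.mp hpd).1
      have hinv' : ∀ p ∈ ((s, j + 1) :: (s.set L[j] r, j + 1) :: rest), p.2 ≤ L.length ∧
          ∀ idx ∈ L.drop p.2, idx < p.1.length ∧ (deasciiMap? (p.1.getD idx ' ')).isSome := by
        intro p hp
        rcases List.mem_cons.mp hp with rfl | hp
        · exact ⟨by omega, fun idx hidx' => hidx idx (by rw [hdropj]; exact List.mem_cons_of_mem _ hidx')⟩
        rcases List.mem_cons.mp hp with rfl | hp
        · refine ⟨by omega, fun idx hidx' => ?_⟩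
          have hmem : idx ∈ L.drop j := by rw [hdropj]; exact List.mem_cons_of_mem _ hidx'
          obtain ⟨hl1, hl2⟩ := hidx idx hmem
          have hne : idx ≠ L[j] := by have := hpairj idx hidx'; omega
          constructor
          · simpa using hl1
          · have : (s.set L[j] r).getD idx ' ' = s.getD idx ' ' := by
              rw [List.getD_eq_getElem _ _ (by simpa using hl1), List.getD_eq_getElem _ _ hl1]
              exact List.getElem_set_ne (show L[j] ≠ idx by omega) (by simpa using hl1)
            rwa [this]
        · exact hinvrest p hp
      have hpot' : (((s, j + 1) :: (s.set L[j] r, j + 1) :: rest).map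
          (fun p => 2 ^ (L.length - p.2 + 1) - 1)).sum ≤ fuel := by
        simp only [List.map_cons, List.sum_cons]
        have he1 : L.length - j + 1 = (L.length - (j + 1) + 1) + 1 := by omega
        have he2 : 2 ^ ((L.length - (j + 1) + 1) + 1) = 2 ^ (L.length - (j + 1) + 1) * 2 :=
          pow_succ 2 _
        have he3 : 1 ≤ 2 ^ (L.length - (j + 1) + 1) := Nat.one_le_two_pow
        rw [he1] at hpot
        omega
      have ih := lemB L hL fuel ((s, j + 1) :: (s.set L[j] r, j + 1) :: rest)
        (res ++ [String.ofList s, String.ofList (s.set L[j] r)]) hinv' hpot'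
      rw [hsl1, hsl2, hset, ih]
      simp only [List.map_cons, List.flatten_cons, hdropj, FF, happ]
      simp [List.append_assoc]

-- ===== VERDICT (by name: the statement is the Claim_ definition above) =====
theorem generateCandidates_spec : Claim_equal_generateCandidates := by
  intro word s hdom hpre
  unfold Spec_generateCandidates
  simp only [generateCandidates, generateCandidates_alt]
  obtain ⟨h0, hle⟩ := hpre
  set w := word.toList with hw
  have hs : s = ((s.toNat : Nat) : Int) := (Int.toNat_of_nonneg h0).symm
  set k := s.toNat with hk
  have hklen : k ≤ w.length := by omega
  have hA : genA (w.length + 1 + s.natAbs) w s = FF (natIdxs w k) w := by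
    rw [hs]; exact lemA (w.length + 1 + ((k : Int)).natAbs) w k (by omega) hklen
  have hI : bIdxs w s = castList (natIdxs w k) := by
    rw [hs]; exact lemIdx w (w.length - k) k le_rfl
  have hL := natIdxs_pairwise w (w.length - k) k le_rfl
  have hB := lemB (natIdxs w k) hL (2 ^ ((natIdxs w k).length + 1)) [(w, 0)] []
    (by
      intro p hp
      rcases List.mem_cons.mp hp with rfl | hp
      · refine ⟨by omega, fun idx hidx' => ?_⟩
        have := natIdxs_mem w (w.length - k) k le_rfl idx (by simpa using hidx')
        exact ⟨this.2.1, this.2.2⟩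
      · exact absurd hp (List.not_mem_nil))
    (by
      simp only [List.map_cons, List.map_nil, List.sum_cons, List.sum_nil]
      simp only [Nat.sub_zero]
      have h1 : 1 ≤ 2 ^ ((natIdxs w k).length + 1) := Nat.one_le_two_pow
      omega)
  rw [hA, hI, show (castList (natIdxs w k)).length = (natIdxs w k).length from by simp [castList], hB]
  simp
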